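-- pv_equiv track=rewrite | github.com/johnzhouinfo/rules | scripts/update_can_ips.py | replace_section
-- ===== SOURCE A (Python) =====
-- from typing import Iterable, List
--
-- def replace_section(lines: List[str], header: str, new_block: List[str]) -> List[str]:
--     header_line = f"# {header}"
--     try:
--         start_idx = lines.index(header_line)
--     except ValueError:
--         raise SystemExit(f"Missing section header: {header_line}")
--
--     end_idx = start_idx + 1
--     while end_idx < len(lines) and not lines[end_idx].startswith("# "):
--         end_idx += 1
--
--     # Ensure a blank line separation before next header.
--     block = new_block + [""]
--     return lines[: start_idx + 1] + block + lines[end_idx:]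
-- ===== SOURCE B (Python) =====
-- from typing import List
--
-- def replace_section(lines: List[str], header: str, new_block: List[str]) -> List[str]:
--     header_line = f"# {header}"
--     out = []
--     it = iter(lines)
--     for line in it:
--         out.append(line)
--         if line == header_line:
--             out.extend(new_block)
--             out.append("")
--             for later in it:
--                 if later.startswith("# "):
--                     out.append(later)
--                     out.extend(it)
--                     break
--             return out
--     raise SystemExit(f"Missing section header: {header_line}")
-- ===== Notes on version B (the rewrite author's own statement) =====
-- stated objective: alternative
-- what changed: Single forward pass over a shared iterator (copy, splice the new block at the first header match, skip to the next '# ' line, copy the rest) instead of index()+while-scan+three-way slice concatenation.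
import Mathlib
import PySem

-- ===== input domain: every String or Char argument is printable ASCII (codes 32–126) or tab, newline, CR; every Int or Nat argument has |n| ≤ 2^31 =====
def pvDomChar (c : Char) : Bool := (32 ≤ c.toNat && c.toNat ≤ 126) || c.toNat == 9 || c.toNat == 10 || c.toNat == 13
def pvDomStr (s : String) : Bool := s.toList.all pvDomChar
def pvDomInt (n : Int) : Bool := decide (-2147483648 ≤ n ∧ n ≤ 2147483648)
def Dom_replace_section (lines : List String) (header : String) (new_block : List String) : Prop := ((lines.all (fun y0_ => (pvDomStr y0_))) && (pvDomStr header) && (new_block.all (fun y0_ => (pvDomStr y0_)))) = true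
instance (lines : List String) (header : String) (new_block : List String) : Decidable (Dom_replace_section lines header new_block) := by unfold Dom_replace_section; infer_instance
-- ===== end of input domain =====

-- ===== PORT A =====
-- Port B differs in structure (single state-machine pass); this file proves agreement of the RETURN values on Pre_.
-- while loop scanning for the next '# ' header, as structural recursion on the suffix
def pvScanA : List String → Nat
  | [] => 0
  | l :: rs => if PySem.Str.startswith l "# " then 0 else 1 + pvScanA rs

def replace_section (lines : List String) (header : String) (new_block : List String) : List String :=
  let header_line := "# " ++ header
  match PySem.List.index? lines header_line with
  | none => []  -- Python raises SystemExit here; excluded by Pre_replace_section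
  | some start_idx =>
      let end_idx := start_idx + 1 + pvScanA (lines.drop (start_idx + 1))
      -- lines[: start_idx + 1] ++ (new_block + [""]) ++ lines[end_idx:]  (indices are nonnegative, so slice = take/drop)
      lines.take (start_idx + 1) ++ (new_block ++ [""]) ++ lines.drop end_idx

-- ===== PORT B =====
-- inner 'for later in it' loop: drop lines until one starting with "# "
def pvSkip : List String → List String
  | [] => []
  | l :: rs => if PySem.Str.startswith l "# " then l :: rs else pvSkip rs

-- outer 'for line in it' loop: copy until the header line, then splice and skip; none = header never found
def pvGo (hl : String) (nb : List String) : List String → Option (List String)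
  | [] => none
  | l :: rest =>
      if l = hl then some (l :: (nb ++ [""] ++ pvSkip rest))
      else (pvGo hl nb rest).map (l :: ·)

def replace_section_alt (lines : List String) (header : String) (new_block : List String) : List String :=
  (pvGo ("# " ++ header) new_block lines).getD []  -- none case: Python raises SystemExit, excluded by Pre_

-- ===== PRECONDITION & SPEC =====
-- A raises SystemExit when the header line is absent; exactly those inputs are excluded.
def Pre_replace_section (lines : List String) (header : String) (new_block : List String) : Prop :=
  ("# " ++ header) ∈ lines
instance (lines : List String) (header : String) (new_block : List String) : Decidable (Pre_replace_section lines header new_block) := by unfold Pre_replace_section; infer_instance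

def pvWitness_replace_section : List String × String × List String :=
  (["# ips", "1.2.3.4", "# next"], "ips", ["5.6.7.8"])

def Spec_replace_section (lines : List String) (header : String) (new_block : List String) (out : List String) : Prop := out = replace_section_alt lines header new_block
instance (lines : List String) (header : String) (new_block : List String) (out : List String) : Decidable (Spec_replace_section lines header new_block out) := by unfold Spec_replace_section; infer_instance

-- ===== CLAIM (what is proved, stated in full; the proofs are below) =====
def Claim_equal_replace_section : Prop := ∀ (lines : List String) (header : String) (new_block : List String), Dom_replace_section lines header new_block → Pre_replace_section lines header new_block → Spec_replace_section lines header new_block (replace_section lines header new_block)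

-- ===== LEMMAS AND PROOFS =====
theorem pvWitness_ok : Dom_replace_section pvWitness_replace_section.1 pvWitness_replace_section.2.1 pvWitness_replace_section.2.2 ∧ Pre_replace_section pvWitness_replace_section.1 pvWitness_replace_section.2.1 pvWitness_replace_section.2.2 := by
  decide

-- dropping A's scan count from a suffix is exactly B's skip
theorem drop_pvScanA (rest : List String) : rest.drop (pvScanA rest) = pvSkip rest := by
  induction rest with
  | nil => rfl
  | cons l rs ih =>
      by_cases h : PySem.Chars.startswith l.toList ['#', ' '] = true
      · simp [pvScanA, pvSkip, h]
      · simp [pvScanA, pvSkip, h, Nat.add_comm 1 (pvScanA rs), ih]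

theorem pvGo_main (hl : String) (nb : List String) (lines : List String) (hmem : hl ∈ lines) :
    ∃ s, PySem.List.index? lines hl = some s ∧
      pvGo hl nb lines =
        some (lines.take (s + 1) ++ (nb ++ [""]) ++ lines.drop (s + 1 + pvScanA (lines.drop (s + 1)))) := by
  induction lines with
  | nil => cases hmem
  | cons l rest ih =>
      by_cases h : l = hl
      · subst h
        refine ⟨0, PySem.List.index?_cons_self .., ?_⟩
        simp [pvGo, Nat.add_comm 1 (pvScanA rest), drop_pvScanA]
      · have hmem' : hl ∈ rest := by
          cases hmem with
          | head => exact absurd rfl h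
          | tail _ h' => exact h'
        obtain ⟨s, hidx, hgo⟩ := ih hmem'
        refine ⟨s + 1, ?_, ?_⟩
        · rw [PySem.List.index?_cons_of_ne rest h, hidx]; rfl
        · have h1 : (l :: rest).take (s + 1 + 1) = l :: rest.take (s + 1) := rfl
          have h2 : ∀ k, (l :: rest).drop (s + 1 + 1 + k) = rest.drop (s + 1 + k) := by
            intro k; simp [Nat.add_right_comm (s+1) 1 k]
          simp [pvGo, h, hgo, h1, h2]

-- ===== VERDICT (by name: the statement is the Claim_ definition above) =====
theorem replace_section_spec : Claim_equal_replace_section := by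
  intro lines header nb _ hpre
  obtain ⟨s, hidx, hgo⟩ := pvGo_main ("# " ++ header) nb lines hpre
  unfold Spec_replace_section replace_section replace_section_alt
  simp only [hidx, hgo, Option.getD_some]
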